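-- pv_equiv track=rewrite | github.com/moyasui/Quanthon | Quanthon/Expectation.py | get_CNOTs
-- ===== SOURCE A (Python) =====
-- def _no_pauli_after_i(pauli_str):
--
--     detected_I = False
--     for op in pauli_str:
--         if not detected_I:
--             if op == 'I':
--                 detected_I = True
--                 continue
--             else:
--                 continue
--         if op != 'I':
--             return False
--     return True
--
-- def get_CNOTs(pauli_str):
--
--     if not _no_pauli_after_i:
--         raise ValueError('Pauli string must not have any Pauli operator after I.')
--     CNOT_pairs = []
--
--     for i in range(len(pauli_str)-1):
--         if pauli_str[i+1] == 'I':
--             break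
--         CNOT_pairs.append((i+1, i))
--
--     return CNOT_pairs
-- ===== SOURCE B (Python) =====
-- def get_CNOTs(pauli_str):
--     # Find the first 'I' at position >= 1, then emit the consecutive (i+1, i)
--     # pairs mechanically instead of the scan-and-break-append loop.
--     p = pauli_str.find('I', 1)
--     n = len(pauli_str) - 1 if p == -1 else p - 1
--     return list(zip(range(1, n + 1), range(n)))
-- ===== Notes on version B (the rewrite author's own statement) =====
-- stated objective: alternative
-- what changed: Replaces the index loop that appends one pair per step and breaks at the first 'I' by computing the cut point once with str.find('I', 1) and generating the consecutive (i+1, i) pairs with zip(range(1, n+1), range(n)).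
import Mathlib
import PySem

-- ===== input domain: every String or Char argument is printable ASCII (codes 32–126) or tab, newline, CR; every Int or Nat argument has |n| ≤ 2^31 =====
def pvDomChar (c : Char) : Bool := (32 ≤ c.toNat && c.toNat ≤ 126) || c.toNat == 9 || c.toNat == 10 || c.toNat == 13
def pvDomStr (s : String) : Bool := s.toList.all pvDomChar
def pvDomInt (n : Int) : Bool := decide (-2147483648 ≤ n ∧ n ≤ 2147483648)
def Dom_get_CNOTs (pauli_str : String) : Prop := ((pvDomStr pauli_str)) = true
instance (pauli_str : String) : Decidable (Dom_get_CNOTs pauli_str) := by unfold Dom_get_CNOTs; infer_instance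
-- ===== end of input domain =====

-- B computes the cut point once with str.find('I', 1) and zips two index ranges,
-- instead of A's index loop that appends one pair per step and breaks at the first 'I'.


-- ===== PORT A =====
-- A's loop: for i in range(len(pauli_str)-1): if pauli_str[i+1] == 'I': break; CNOT_pairs.append((i+1, i))
-- (the break is ported as stopping the recursion; cs[i+1] is in range whenever the loop guard holds)
def pvLoopA (cs : List Char) (i : Nat) (acc : List (Int × Int)) : List (Int × Int) :=
  if h : i < cs.length - 1 then
    if cs[i+1]'(by omega) = 'I' then acc
    else pvLoopA cs (i + 1) (acc ++ [((i : Int) + 1, (i : Int))])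
  else acc
termination_by cs.length - 1 - i

-- Python A's `if not _no_pauli_after_i:` tests the FUNCTION OBJECT (always truthy),
-- so the raise is dead code on every input; the helper is never called and is not ported.
def get_CNOTs (pauli_str : String) : List (Int × Int) :=
  pvLoopA pauli_str.toList 0 []

-- ===== PORT B =====
def get_CNOTs_alt (pauli_str : String) : List (Int × Int) :=
  let p := PySem.Str.findFrom pauli_str "I" 1
  let n : Int := if p = -1 then PySem.Str.len pauli_str - 1 else p - 1
  List.zip (PySem.List.pyRange 1 (n + 1) 1) (PySem.List.pyRange 0 n 1)

-- ===== PRECONDITION & SPEC =====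
def Spec_get_CNOTs (pauli_str : String) (out : List (Int × Int)) : Prop := out = get_CNOTs_alt pauli_str
instance (pauli_str : String) (out : List (Int × Int)) : Decidable (Spec_get_CNOTs pauli_str out) := by unfold Spec_get_CNOTs; infer_instance

-- ===== CLAIM (what is proved, stated in full; the proofs are below) =====
def Claim_equal_get_CNOTs : Prop := ∀ (pauli_str : String), Dom_get_CNOTs pauli_str → Spec_get_CNOTs pauli_str (get_CNOTs pauli_str)

-- ===== LEMMAS AND PROOFS =====

lemma pv_singleton_prefix_drop (c : Char) (cs : List Char) (j : Nat) :
    [c] <+: cs.drop j ↔ cs[j]? = some c := by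
  rw [← List.head?_drop]
  constructor
  · rintro ⟨t, ht⟩; rw [← ht]; rfl
  · intro h
    rcases hd : cs.drop j with _ | ⟨x, t⟩
    · simp [hd] at h
    · rw [hd] at h; simp at h; exact ⟨t, by rw [h]; rfl⟩

-- s.find(sub) for a one-character sub is List.findIdx (or -1 when the char is absent)
lemma pv_find_singleton (c : Char) (cs : List Char) :
    PySem.Chars.find cs [c] = if c ∈ cs then (cs.findIdx (· == c) : Int) else -1 := by
  by_cases h : c ∈ cs
  · simp only [if_pos h]
    have hinf : [c] <:+: cs := (List.singleton_infix_iff c cs).mpr h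
    have hnn : 0 ≤ PySem.Chars.find cs [c] := (PySem.Chars.find_nonneg_iff cs [c]).mpr hinf
    obtain ⟨hpre, hmin⟩ := PySem.Chars.find_spec hnn
    have hlt : cs.findIdx (· == c) < cs.length := by
      rw [List.findIdx_lt_length]; exact ⟨c, h, by simp⟩
    have hatm : cs[cs.findIdx (· == c)]? = some c := by
      have := @List.findIdx_getElem _ (· == c) cs hlt
      simp at this
      simp [List.getElem?_eq_getElem hlt, this]
    have h1 : ¬ (cs.findIdx (· == c) < (PySem.Chars.find cs [c]).toNat) := by
      intro hc
      exact hmin _ hc ((pv_singleton_prefix_drop c cs _).mpr hatm)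
    have h2 : ¬ ((PySem.Chars.find cs [c]).toNat < cs.findIdx (· == c)) := by
      intro hc
      have hne := List.not_of_lt_findIdx hc
      have := (pv_singleton_prefix_drop c cs _).mp hpre
      have hlen : (PySem.Chars.find cs [c]).toNat < cs.length := by omega
      rw [List.getElem?_eq_getElem hlen] at this
      simp at this hne
      exact hne this
    have : (PySem.Chars.find cs [c]).toNat = cs.findIdx (· == c) := by omega
    omega
  · simp only [if_neg h]
    rw [PySem.Chars.find_eq_neg_one_iff]
    rw [List.singleton_infix_iff]
    exact h

-- A's loop emits the first m consecutive pairs, m = index of the first 'I' after position i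
-- (List.findIdx, which is the remaining length when there is no 'I')
lemma pvLoopA_eq (cs : List Char) (i : Nat) (acc : List (Int × Int)) :
    pvLoopA cs i acc =
      acc ++ (List.range ((cs.drop (i+1)).findIdx (· == 'I'))).map
        (fun (k : Nat) => ((i : Int) + k + 1, (i : Int) + k)) := by
  rw [pvLoopA]
  split
  · next h =>
    have hd : cs.drop (i+1) = cs[i+1]'(by omega) :: cs.drop (i+2) :=
      List.drop_eq_getElem_cons (by omega)
    split
    · next hI =>
      rw [hd, hI]
      simp [List.findIdx_cons]
    · next hI =>
      rw [pvLoopA_eq cs (i+1) _]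
      rw [hd, List.findIdx_cons]
      have : (cs[i+1]'(by omega) == 'I') = false := by simp [hI]
      rw [this]
      simp only [cond_false, List.range_succ_eq_map, List.map_cons, List.map_map]
      simp only [List.append_assoc, List.cons_append, List.nil_append]
      congr 1
      rw [List.cons_eq_cons]
      refine ⟨?_, ?_⟩
      · simp only [Prod.mk.injEq]; constructor <;> push_cast <;> ring
      · apply List.map_congr_left
        intro k _
        simp only [Function.comp, Prod.mk.injEq]
        constructor <;> push_cast <;> ring
  · next h =>
    have : cs.drop (i+1) = [] := List.drop_eq_nil_of_le (by omega)
    simp [this]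
termination_by cs.length - 1 - i

-- B's zip of the two ranges is the same list of consecutive pairs
lemma pv_zip_ranges (m : Nat) :
    List.zip (PySem.List.pyRange 1 ((m : Int) + 1) 1) (PySem.List.pyRange 0 (m : Int) 1)
      = (List.range m).map (fun (k : Nat) => ((k : Int) + 1, (k : Int))) := by
  rw [PySem.List.pyRange_one, PySem.List.pyRange_one]
  have h1 : ((m : Int) + 1 - 1).toNat = m := by omega
  have h2 : ((m : Int) - 0).toNat = m := by omega
  rw [h1, h2, List.zip_map']
  apply List.map_congr_left
  intro k _
  simp only [Prod.mk.injEq]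
  constructor <;> ring

lemma pv_main (s : String) : pvLoopA s.toList 0 [] = get_CNOTs_alt s := by
  unfold get_CNOTs_alt
  rw [pvLoopA_eq]
  simp only [List.nil_append, PySem.Str.findFrom_eq, PySem.Str.len_eq]
  rcases hc : s.toList with _ | ⟨c, rest⟩
  · have hp : PySem.Chars.findFrom ([] : List Char) ['I'] 1 none = -1 := by decide
    simp [hp]
  · simp only [show "I".toList = ['I'] from rfl]
    have hk := PySem.Chars.findFrom_natCast (c :: rest) ['I'] 1 (by simp)
    norm_num at hk
    rw [hk]
    simp only [List.drop_succ_cons, List.drop_zero]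
    rw [pv_find_singleton 'I' rest]
    by_cases hm : 'I' ∈ rest
    · rw [if_pos hm]
      rw [if_neg (by omega : ¬ ((rest.findIdx (· == 'I') : Int) = -1))]
      rw [if_neg (by omega : ¬ ((1 : Int) + (rest.findIdx (· == 'I') : Int) = -1))]
      have hn : (1 : Int) + (rest.findIdx (· == 'I') : Int) - 1 = (rest.findIdx (· == 'I') : Int) := by ring
      rw [hn, pv_zip_ranges]
      apply List.map_congr_left
      intro k _
      simp
    · rw [if_neg hm, if_pos rfl, if_pos rfl]
      have hfi : rest.findIdx (· == 'I') = rest.length := by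
        rw [List.findIdx_eq_length]
        intro x hx
        simp
        rintro rfl; exact hm hx
      have hlen : ((c :: rest).length : Int) - 1 = (rest.length : Int) := by
        simp
      rw [hfi, hlen, pv_zip_ranges]
      apply List.map_congr_left
      intro k _
      simp

-- ===== VERDICT (by name: the statement is the Claim_ definition above) =====
theorem get_CNOTs_spec : Claim_equal_get_CNOTs := by
  intro s _
  unfold Spec_get_CNOTs get_CNOTs
  exact pv_main s
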